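-- pv_equiv track=rewrite | github.com/clarkerubber/irwin | modules/irwin/AnalysisReport.py | zipLOL
-- ===== SOURCE A (Python) =====
-- def zipLOL(lol):
--     # List of Lists (can be different length)
--     # assumes the input isn't : []
--     longest = max([len(l) for l in lol])
--     bins = [[] for i in range(longest)]
--     for l in lol:
--         try:
--             [bins[i].append(l[i]) for i in range(longest) if l[i] is not None]
--         except IndexError:
--             continue
--     return bins
-- ===== SOURCE B (Python) =====
-- def zipLOL(lol):
--     # column-major: one output bin per column index, scanning the rows
--     longest = max(len(l) for l in lol)
--     return [[l[i] for l in lol if i < len(l) and l[i] is not None]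
--             for i in range(longest)]
-- ===== Notes on version B (the rewrite author's own statement) =====
-- stated objective: simpler
-- what changed: B swaps the loop nesting: instead of A's row-major pass that appends into pre-built mutable bins under a try/except IndexError, B builds each column directly with a column-major comprehension guarded by i < len(l); same values, order, bin count and ValueError on empty input.
-- outside the precondition, e.g. on zipLOL([]): A raises ValueError, B raises ValueError
import Mathlib
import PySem

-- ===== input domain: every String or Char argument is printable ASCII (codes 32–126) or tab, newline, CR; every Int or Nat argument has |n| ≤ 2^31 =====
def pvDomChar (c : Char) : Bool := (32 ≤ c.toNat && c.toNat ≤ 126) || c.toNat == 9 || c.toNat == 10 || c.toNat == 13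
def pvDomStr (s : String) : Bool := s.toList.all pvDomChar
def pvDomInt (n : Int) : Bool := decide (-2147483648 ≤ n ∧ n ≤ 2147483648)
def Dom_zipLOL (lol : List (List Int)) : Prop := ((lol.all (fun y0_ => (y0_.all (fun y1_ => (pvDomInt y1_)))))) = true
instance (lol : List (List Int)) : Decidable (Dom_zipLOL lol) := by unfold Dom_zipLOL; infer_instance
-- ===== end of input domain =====

-- B swaps the loop nesting: column-major comprehension instead of A's row-major
-- append-into-bins with try/except IndexError; objective: simpler.

-- ===== PORT A =====
-- One row's inner comprehension: for i in range(longest), append l[i] to bins[i].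
-- In Python the comprehension is aborted by IndexError at i = l.length (when l is
-- shorter than longest) and the row is then skipped via `continue`; since every
-- later index of l would also raise, skipping exactly those indices is exact.
-- Elements are Ints here, so `l[i] is not None` is always true on Dom.
def zipLOL_row (l : List Int) (bins : List (List Int)) : List (List Int) :=
  bins.mapIdx (fun i b =>
    match l[i]? with
    | some v => b ++ [v]
    | none => b)

def zipLOL (lol : List (List Int)) : List (List Int) :=
  -- longest = max([len(l) for l in lol]); raises ValueError on lol = [] (excluded by Pre_)
  let longest : Nat := ((lol.map List.length).max?).getD 0
  let bins : List (List Int) := (List.range longest).map (fun _ => ([] : List Int))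
  lol.foldl (fun bins l => zipLOL_row l bins) bins

-- ===== PORT B =====
def zipLOL_alt (lol : List (List Int)) : List (List Int) :=
  -- longest = max(len(l) for l in lol); raises ValueError on lol = [] (excluded by Pre_)
  let longest : Nat := ((lol.map List.length).max?).getD 0
  -- [l[i] for l in lol if i < len(l) and l[i] is not None]: l[i]? is some iff i < len(l);
  -- the `is not None` guard is vacuous for Int elements.
  (List.range longest).map (fun i => lol.filterMap (fun l => l[i]?))

-- ===== PRECONDITION & SPEC =====
-- Pre_ excludes only lol = [], on which both Pythons raise ValueError (max of empty).
def Pre_zipLOL (lol : List (List Int)) : Prop := lol ≠ []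
instance (lol : List (List Int)) : Decidable (Pre_zipLOL lol) := by unfold Pre_zipLOL; infer_instance
def pvWitness_zipLOL : List (List Int) := [[1, 2], [3]]

def Spec_zipLOL (lol : List (List Int)) (out : List (List Int)) : Prop := out = zipLOL_alt lol
instance (lol : List (List Int)) (out : List (List Int)) : Decidable (Spec_zipLOL lol out) := by unfold Spec_zipLOL; infer_instance

-- ===== CLAIM (what is proved, stated in full; the proofs are below) =====
def Claim_equal_zipLOL : Prop := ∀ (lol : List (List Int)), Dom_zipLOL lol → Pre_zipLOL lol → Spec_zipLOL lol (zipLOL lol)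

-- ===== LEMMAS AND PROOFS =====

-- One row's update, on a state that is a map over range.
theorem zipLOL_row_map (n : Nat) (g : Nat → List Int) (l : List Int) :
    zipLOL_row l ((List.range n).map g)
      = (List.range n).map (fun i => g i ++ (l[i]?).toList) := by
  unfold zipLOL_row
  apply List.ext_getElem
  · simp
  · intro i h1 h2
    simp only [List.getElem_mapIdx, List.getElem_map, List.getElem_range]
    cases l[i]? <;> simp

-- Invariant of the row fold.
theorem zipLOL_fold (rows : List (List Int)) : ∀ (n : Nat) (g : Nat → List Int),
    rows.foldl (fun bins l => zipLOL_row l bins) ((List.range n).map g)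
      = (List.range n).map (fun i => g i ++ rows.filterMap (fun l => l[i]?)) := by
  induction rows with
  | nil => intro n g; simp
  | cons l rows ih =>
    intro n g
    simp only [List.foldl_cons, zipLOL_row_map, ih]
    apply List.map_congr_left
    intro i _
    cases h : l[i]? <;> simp [h]

-- ===== VERDICT (by name: the statement is the Claim_ definition above) =====
theorem zipLOL_spec : Claim_equal_zipLOL := by
  intro lol _ _
  unfold Spec_zipLOL zipLOL zipLOL_alt
  simp only
  rw [zipLOL_fold]
  simp
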